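-- pv_equiv track=rewrite | github.com/smorgenfeld/game4 | terrain.py | getTiles
-- ===== SOURCE A (Python) =====
-- def getTiles(ttt,h):
--     lol = []
--     lool = []
--     for i in range(h):
--         lol.append(ttt[i].count('ice_ds'))#0
--         lol.append(ttt[i].count('norm_ds'))#1
--         lol.append(ttt[i].count('ice_ss'))#2
--         lol.append(ttt[i].count('norm_ss'))#3
--         lol.append(ttt[i].count('ice_b'))#4
--         lol.append(ttt[i].count('norm_b'))#5
--         lol.append(ttt[i].count('ice_h'))#6
--         lol.append(ttt[i].count('tundra_h'))#7
--         lol.append(ttt[i].count('forest_h'))#8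
--         lol.append(ttt[i].count('grass_h'))#9
--         lol.append(ttt[i].count('desert_h'))#10
--         lol.append(ttt[i].count('ice_p'))#11
--         lol.append(ttt[i].count('tundra_p'))#12
--         lol.append(ttt[i].count('forest_p'))#13
--         lol.append(ttt[i].count('grass_p'))#14
--         lol.append(ttt[i].count('desert_p'))#15
--         lol.append(ttt[i].count('ice_m'))#16
--         lol.append(ttt[i].count('desert_m'))#17
--         lol.append(ttt[i].count('norm_m'))#18
--     for j in range(19):
--         lool.append(0)
--         for i in range(h):
--             lool[j] += lol[i*19+j]
--     return lool
-- ===== SOURCE B (Python) =====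
-- TYPES = ['ice_ds', 'norm_ds', 'ice_ss', 'norm_ss', 'ice_b', 'norm_b',
--          'ice_h', 'tundra_h', 'forest_h', 'grass_h', 'desert_h',
--          'ice_p', 'tundra_p', 'forest_p', 'grass_p', 'desert_p',
--          'ice_m', 'desert_m', 'norm_m']
--
-- def getTiles(ttt, h):
--     counts = {}
--     for i in range(h):
--         for t in ttt[i]:
--             counts[t] = counts.get(t, 0) + 1
--     return [counts.get(t, 0) for t in TYPES]
-- ===== Notes on version B (the rewrite author's own statement) =====
-- stated objective: faster
-- what changed: One tallying pass builds a frequency dict over the first h rows, then the 19-element result is read off the table in type order, replacing 19 .count scans per row plus a flat intermediate list and a second h*19 summation loop.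
import Mathlib
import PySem

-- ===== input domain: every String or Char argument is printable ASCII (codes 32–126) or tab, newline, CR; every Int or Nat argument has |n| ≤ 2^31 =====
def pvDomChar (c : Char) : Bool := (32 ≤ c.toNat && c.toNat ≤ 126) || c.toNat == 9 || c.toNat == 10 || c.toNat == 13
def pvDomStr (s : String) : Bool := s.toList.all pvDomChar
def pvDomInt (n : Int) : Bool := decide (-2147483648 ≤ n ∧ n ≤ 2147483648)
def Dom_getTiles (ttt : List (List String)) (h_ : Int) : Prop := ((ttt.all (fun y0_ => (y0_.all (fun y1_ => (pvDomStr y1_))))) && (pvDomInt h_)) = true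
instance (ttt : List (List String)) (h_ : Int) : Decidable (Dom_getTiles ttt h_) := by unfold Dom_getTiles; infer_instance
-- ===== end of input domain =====

-- B replaces A's 19 per-row .count scans + flat list + second summation loop by one
-- tallying pass into a dict and one ordered read of the 19 type names (objective: faster,
-- constant-factor: a timing run's measurement is the label of record).


-- ===== PORT A =====
-- the 19 counts A appends for row i, in A's order
def pvCountsRow (r : List String) : List Int :=
  [(PySem.List.count r "ice_ds" : Int), (PySem.List.count r "norm_ds" : Int),
   (PySem.List.count r "ice_ss" : Int), (PySem.List.count r "norm_ss" : Int),
   (PySem.List.count r "ice_b" : Int), (PySem.List.count r "norm_b" : Int),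
   (PySem.List.count r "ice_h" : Int), (PySem.List.count r "tundra_h" : Int),
   (PySem.List.count r "forest_h" : Int), (PySem.List.count r "grass_h" : Int),
   (PySem.List.count r "desert_h" : Int), (PySem.List.count r "ice_p" : Int),
   (PySem.List.count r "tundra_p" : Int), (PySem.List.count r "forest_p" : Int),
   (PySem.List.count r "grass_p" : Int), (PySem.List.count r "desert_p" : Int),
   (PySem.List.count r "ice_m" : Int), (PySem.List.count r "desert_m" : Int),
   (PySem.List.count r "norm_m" : Int)]

-- ttt[i] / lol[i*19+j]: indices are in range on Pre_ (IndexError otherwise is excluded), so pyGetD is exact there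
def getTiles (ttt : List (List String)) (h_ : Int) : List Int :=
  let lol := (PySem.List.pyRange 0 h_ 1).foldl
    (fun acc i => acc ++ pvCountsRow (PySem.List.pyGetD ttt i [])) []
  (PySem.List.pyRange 0 19 1).foldl
    (fun lool j => lool ++
      [(PySem.List.pyRange 0 h_ 1).foldl (fun s i => s + PySem.List.pyGetD lol (i * 19 + j) 0) 0])
    []

-- ===== PORT B =====
def pvTypes : List String :=
  ["ice_ds", "norm_ds", "ice_ss", "norm_ss", "ice_b", "norm_b",
   "ice_h", "tundra_h", "forest_h", "grass_h", "desert_h",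
   "ice_p", "tundra_p", "forest_p", "grass_p", "desert_p",
   "ice_m", "desert_m", "norm_m"]

def getTiles_alt (ttt : List (List String)) (h_ : Int) : List Int :=
  let counts := (PySem.List.pyRange 0 h_ 1).foldl
    (fun d i => (PySem.List.pyGetD ttt i []).foldl
        (fun d t => d.insert t (d.getD t 0 + 1)) d)
    PySem.Dict.empty
  pvTypes.map (fun t => counts.getD t 0)

-- ===== PRECONDITION & SPEC =====
-- exactly where A returns: for h_ > len(ttt) the access ttt[i] raises IndexError (B raises there too)
def Pre_getTiles (ttt : List (List String)) (h_ : Int) : Prop := h_ ≤ (ttt.length : Int)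
instance (ttt : List (List String)) (h_ : Int) : Decidable (Pre_getTiles ttt h_) := by unfold Pre_getTiles; infer_instance
def pvWitness_getTiles : List (List String) × Int := ([["ice_b", "norm_m", "lava"], []], 2)

def Spec_getTiles (ttt : List (List String)) (h_ : Int) (out : List Int) : Prop := out = getTiles_alt ttt h_
instance (ttt : List (List String)) (h_ : Int) (out : List Int) : Decidable (Spec_getTiles ttt h_ out) := by unfold Spec_getTiles; infer_instance

-- ===== CLAIM (what is proved, stated in full; the proofs are below) =====
def Claim_equal_getTiles : Prop := ∀ (ttt : List (List String)) (h_ : Int), Dom_getTiles ttt h_ → Pre_getTiles ttt h_ → Spec_getTiles ttt h_ (getTiles ttt h_)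

-- ===== LEMMAS AND PROOFS =====

theorem pvCountsRow_length (r : List String) : (pvCountsRow r).length = 19 := rfl

-- B side: the tally dict holds, for each key, the total count over the first h_ rows
theorem pv_tally (L : List Int) (ttt : List (List String)) (d : PySem.Dict String Int) (t : String) :
    (L.foldl (fun d i => (PySem.List.pyGetD ttt i []).foldl
        (fun d t => d.insert t (d.getD t 0 + 1)) d) d).getD t 0
    = d.getD t 0 + (L.map (fun i => (List.count t (PySem.List.pyGetD ttt i []) : Int))).sum := by
  induction L generalizing d with
  | nil => simp
  | cons a L ih =>
      simp only [List.foldl_cons, ih, List.map_cons, List.sum_cons]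
      rw [PySem.Dict.getD_foldl_insert_add_one]
      ring

-- A side: indexing the flattened 19-wide chunk list
theorem pv_flat_idx (g : Int → List Int) (hg : ∀ i, (g i).length = 19) :
    ∀ (n : Nat) (a b i j : Int), (b - a).toNat = n → a ≤ i → i < b → 0 ≤ j → j < 19 →
    PySem.List.pyGetD ((PySem.List.pyRange a b 1).flatMap g) ((i - a) * 19 + j) 0
      = PySem.List.pyGetD (g i) j 0 := by
  intro n
  induction n with
  | zero => intro a b i j hn hai hib _ _; omega
  | succ n ih =>
      intro a b i j hn hai hib hj0 hj19
      have hab : a < b := by omega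
      rw [PySem.List.pyRange_one_cons hab, List.flatMap_cons]
      by_cases hia : i = a
      · subst hia
        have e1 : (i - i) * 19 + j = ((j.toNat : Nat) : Int) := by omega
        have e2 : j = ((j.toNat : Nat) : Int) := by omega
        rw [e1, PySem.List.pyGetD_natCast]
        rw [e2, PySem.List.pyGetD_natCast]
        rw [List.getD_append _ _ _ _ (by rw [hg]; omega)]
        congr 1
      · have hai' : a + 1 ≤ i := by omega
        have key := ih (a+1) b i j (by omega) hai' hib hj0 hj19
        rw [← key]
        have e1 : (i - a) * 19 + j = ((((i - a) * 19 + j).toNat : Nat) : Int) := by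
          have : (0:Int) ≤ (i - a) * 19 + j := by nlinarith
          omega
        have e2 : (i - (a+1)) * 19 + j = ((((i - (a+1)) * 19 + j).toNat : Nat) : Int) := by
          have : (0:Int) ≤ (i - (a+1)) * 19 + j := by nlinarith
          omega
        rw [e1, PySem.List.pyGetD_natCast, e2, PySem.List.pyGetD_natCast]
        rw [List.getD_append_right _ _ _ _ (by rw [hg]; omega)]
        congr 1
        rw [hg]
        omega

-- A's column-j sum equals B's tally at the j-th type name
theorem pv_col (ttt : List (List String)) (h_ : Int) (j : Int) (t : String)
    (hj0 : 0 ≤ j) (hj19 : j < 19)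
    (hc : ∀ r, PySem.List.pyGetD (pvCountsRow r) j 0 = (List.count t r : Int)) :
    (PySem.List.pyRange 0 h_ 1).foldl
      (fun s i => s + PySem.List.pyGetD
        ((PySem.List.pyRange 0 h_ 1).foldl
          (fun acc i => acc ++ pvCountsRow (PySem.List.pyGetD ttt i [])) [])
        (i * 19 + j) 0) 0
    = ((PySem.List.pyRange 0 h_ 1).foldl
        (fun d i => (PySem.List.pyGetD ttt i []).foldl
          (fun d t => d.insert t (d.getD t 0 + 1)) d)
        PySem.Dict.empty).getD t 0 := by
  rw [pv_tally]
  rw [PySem.List.foldl_append_eq_flatMap, List.nil_append]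
  rw [PySem.List.foldl_congr_mem _ _
        (fun s i => s + PySem.List.pyGetD (pvCountsRow (PySem.List.pyGetD ttt i [])) j 0) _
        (by
          intro acc i hi
          rw [PySem.List.mem_pyRange_one] at hi
          congr 1
          have := pv_flat_idx (fun i => pvCountsRow (PySem.List.pyGetD ttt i []))
            (fun i => pvCountsRow_length _) ((h_ - 0).toNat) 0 h_ i j rfl hi.1 hi.2 hj0 hj19
          simpa using this)]
  rw [PySem.List.foldl_add]
  simp only [PySem.Dict.getD_empty, zero_add]
  congr 1
  apply List.map_congr_left
  intro i _
  exact hc _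

-- ===== VERDICT (by name: the statement is the Claim_ definition above) =====
theorem getTiles_spec : Claim_equal_getTiles := by
  intro ttt h_ _ _
  unfold Spec_getTiles getTiles getTiles_alt pvTypes
  rw [show PySem.List.pyRange 0 19 1 = [0,1,2,3,4,5,6,7,8,9,10,11,12,13,14,15,16,17,18] from by decide]
  simp only [List.foldl_cons, List.foldl_nil, List.map_cons, List.map_nil, List.nil_append,
    List.append_assoc, List.singleton_append]
  refine List.ext_getElem (by simp) ?_
  intro k hk1 hk2
  have hk : k < 19 := by simpa using hk1
  interval_cases k <;>
    simp only [List.getElem_cons_zero, List.getElem_cons_succ] <;>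
    exact pv_col ttt h_ _ _ (by norm_num) (by norm_num)
      (fun r => by simp [pvCountsRow, PySem.List.pyGetD_ofNat', PySem.List.count_eq])
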